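-- pv_equiv track=rewrite | github.com/verasophiab/algorithmic_fun | Biology_Meets_Programming/Motifs.py | ScorewithPseudoCounts
-- ===== SOURCE A (Python) =====
-- def CountWithPseudocounts(Motifs):
--     count = {}
--     for nt in "ACGT":
--         count[nt] = [1]*len(Motifs[0])
--     for motif in Motifs:
--         for index, let in enumerate(motif):
--             count[let][index] += 1
--     return count
--
-- def ConsensuswithPseudoCounts(Motifs):
--     count = CountWithPseudocounts(Motifs)
--     consensus_str = ""
--     for posit in range(len(count["A"])):
--         consensus_str += max({'A':count['A'][posit], 'C':count['C'][posit], 'G':count['G'][posit], 'T':count['T'][posit]},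
--                              key = {'A':count['A'][posit], 'C':count['C'][posit], 'G':count['G'][posit], 'T':count['T'][posit]}.get)
--     return consensus_str
--
-- def ScorewithPseudoCounts(Motifs):
--     count = CountWithPseudocounts(Motifs)
--     consensus = ConsensuswithPseudoCounts(Motifs)
--     score = 0
--     for index, value in enumerate(consensus):
--         for key in count.keys():
--             if (key != value) & (count[key][index] != 0):
--                 score += count[key][index]
--     return score
-- ===== SOURCE B (Python) =====
-- def CountWithPseudocounts(Motifs):
--     count = {}
--     for nt in "ACGT":
--         count[nt] = [1]*len(Motifs[0])
--     for motif in Motifs: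
--         for index, let in enumerate(motif):
--             count[let][index] += 1
--     return count
--
-- def ScorewithPseudoCounts(Motifs):
--     # same pseudocount matrix, but score each column directly as total - max:
--     # no consensus string, no per-column argmax dict
--     count = CountWithPseudocounts(Motifs)
--     score = 0
--     for i in range(len(count["A"])):
--         col = [count[nt][i] for nt in "ACGT"]
--         score += sum(col) - max(col)
--     return score
-- ===== Notes on version B (the rewrite author's own statement) =====
-- stated objective: simpler
-- what changed: B keeps the pseudocount matrix but deletes the consensus stage entirely: instead of building a consensus string by per-column argmax over a dict and then re-scanning the counts against it with an inequality test, B scores each column in one direct step as sum(column) - max(column).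
import Mathlib
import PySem

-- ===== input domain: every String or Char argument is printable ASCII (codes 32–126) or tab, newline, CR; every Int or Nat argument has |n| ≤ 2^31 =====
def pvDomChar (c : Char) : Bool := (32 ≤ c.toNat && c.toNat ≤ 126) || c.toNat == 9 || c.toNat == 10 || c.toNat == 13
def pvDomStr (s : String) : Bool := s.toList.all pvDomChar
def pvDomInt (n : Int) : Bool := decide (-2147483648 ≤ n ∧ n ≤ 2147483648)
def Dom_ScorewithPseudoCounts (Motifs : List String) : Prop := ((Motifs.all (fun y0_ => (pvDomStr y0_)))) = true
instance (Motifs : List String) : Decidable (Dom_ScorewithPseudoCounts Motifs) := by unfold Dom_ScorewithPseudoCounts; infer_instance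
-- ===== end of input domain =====

-- B replaces A's consensus-string pass (argmax char per column, then re-scan counts
-- against it) by scoring each column directly as total-minus-max; same counting step.

-- ===== PORT A =====
def CountWithPseudocounts (Motifs : List String) : PySem.Dict Char (List Int) :=
  let count : PySem.Dict Char (List Int) :=
    "ACGT".toList.foldl
      (fun d nt =>
        d.insert nt (PySem.List.pyRepeat [(1 : Int)]
          (PySem.Str.len ((PySem.List.pyGet? Motifs 0).getD ""))))
      PySem.Dict.empty
  Motifs.foldl
    (fun d motif =>
      (PySem.List.enumerate motif.toList 0).foldl
        (fun d iv =>
          -- count[let][index] += 1 ; the KeyError/IndexError cases are excluded by Pre_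
          d.modify iv.2 [] (fun l => PySem.List.pySetD l iv.1 (PySem.List.pyGetD l iv.1 0 + 1)))
        d)
    count

-- Python str result ported as its character list (exact: PySem strings are their toList)
def ConsensuswithPseudoCounts (Motifs : List String) : List Char :=
  let count := CountWithPseudocounts Motifs
  (PySem.List.pyRange 0 (PySem.List.len (count.getD 'A' [])) 1).foldl
    (fun consensus posit =>
      let d : PySem.Dict Char Int :=
        ((((PySem.Dict.empty).insert 'A' (PySem.List.pyGetD (count.getD 'A' []) posit 0)).insert
            'C' (PySem.List.pyGetD (count.getD 'C' []) posit 0)).insert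
            'G' (PySem.List.pyGetD (count.getD 'G' []) posit 0)).insert
            'T' (PySem.List.pyGetD (count.getD 'T' []) posit 0)
      consensus ++ [(PySem.List.max? d.keys (fun k => d.getD k 0)).getD 'A'])
    []

def ScorewithPseudoCounts (Motifs : List String) : Int :=
  let count := CountWithPseudocounts Motifs
  let consensus := ConsensuswithPseudoCounts Motifs
  (PySem.List.enumerate consensus 0).foldl
    (fun score iv =>
      count.keys.foldl
        (fun score key =>
          if key ≠ iv.2 ∧ PySem.List.pyGetD (count.getD key []) iv.1 0 ≠ 0 then
            score + PySem.List.pyGetD (count.getD key []) iv.1 0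
          else score)
        score)
    0

-- ===== PORT B =====  (same counting helper as Source B; the scoring pass is new)
def ScorewithPseudoCounts_alt (Motifs : List String) : Int :=
  let count := CountWithPseudocounts Motifs
  (PySem.List.pyRange 0 (PySem.List.len (count.getD 'A' [])) 1).foldl
    (fun score i =>
      let col := "ACGT".toList.map (fun nt => PySem.List.pyGetD (count.getD nt []) i 0)
      score + (col.sum - (PySem.List.max? col (fun x => x)).getD 0))
    0

-- ===== PRECONDITION & SPEC =====
-- Pre_ excludes exactly the inputs where A raises: empty Motifs (IndexError on Motifs[0]),
-- a character outside "ACGT" (KeyError), or a motif longer than the first (IndexError).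
def Pre_ScorewithPseudoCounts (Motifs : List String) : Prop :=
  Motifs ≠ [] ∧
  (Motifs.all (fun m =>
    decide (m.toList.length ≤ (Motifs.headD "").toList.length) &&
    m.toList.all (fun ch => ch == 'A' || ch == 'C' || ch == 'G' || ch == 'T'))) = true
instance (Motifs : List String) : Decidable (Pre_ScorewithPseudoCounts Motifs) := by
  unfold Pre_ScorewithPseudoCounts; infer_instance

def pvWitness_ScorewithPseudoCounts : List String := ["AC", "GT"]

def Spec_ScorewithPseudoCounts (Motifs : List String) (out : Int) : Prop := out = ScorewithPseudoCounts_alt Motifs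
instance (Motifs : List String) (out : Int) : Decidable (Spec_ScorewithPseudoCounts Motifs out) := by
  unfold Spec_ScorewithPseudoCounts; infer_instance

-- ===== CLAIM (what is proved, stated in full; the proofs are below) =====
def Claim_equal_ScorewithPseudoCounts : Prop := ∀ (Motifs : List String), Dom_ScorewithPseudoCounts Motifs → Pre_ScorewithPseudoCounts Motifs → Spec_ScorewithPseudoCounts Motifs (ScorewithPseudoCounts Motifs)

-- ===== LEMMAS AND PROOFS =====

-- invariant carried through the counting loops: the dict always has exactly the keys
-- 'A','C','G','T' in this order, each bound to a length-n list of entries ≥ 1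
def GoodCol (n : Nat) (l : List Int) : Prop := l.length = n ∧ ∀ x ∈ l, 1 ≤ x

def GoodDict (n : Nat) (d : PySem.Dict Char (List Int)) : Prop :=
  ∃ lA lC lG lT, d = PySem.Dict.mk [('A', lA), ('C', lC), ('G', lG), ('T', lT)] ∧
    GoodCol n lA ∧ GoodCol n lC ∧ GoodCol n lG ∧ GoodCol n lT

theorem goodCol_set {n : Nat} {l : List Int} (h : GoodCol n l) (i : Nat) (hi : i < n) :
    GoodCol n (PySem.List.pySetD l (i : Int) (PySem.List.pyGetD l (i : Int) 0 + 1)) := by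
  obtain ⟨hlen, hmem⟩ := h
  simp only [PySem.List.pySetD_natCast, PySem.List.pyGetD_natCast]
  constructor
  · simpa using hlen
  · intro x hx
    rcases List.mem_or_eq_of_mem_set hx with h' | h'
    · exact hmem x h'
    · have hi' : i < l.length := by omega
      have : l.getD i 0 = l[i] := List.getD_eq_getElem l 0 hi'
      have := hmem l[i] (List.getElem_mem hi')
      omega

theorem goodDict_modify {n : Nat} {d : PySem.Dict Char (List Int)} (hd : GoodDict n d)
    (ch : Char) (hch : ch = 'A' ∨ ch = 'C' ∨ ch = 'G' ∨ ch = 'T') (i : Nat) (hi : i < n) :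
    GoodDict n (d.modify ch []
      (fun l => PySem.List.pySetD l (i : Int) (PySem.List.pyGetD l (i : Int) 0 + 1))) := by
  obtain ⟨lA, lC, lG, lT, rfl, hA, hC, hG, hT⟩ := hd
  rcases hch with rfl | rfl | rfl | rfl
  · exact ⟨_, lC, lG, lT, rfl, goodCol_set hA i hi, hC, hG, hT⟩
  · exact ⟨lA, _, lG, lT, rfl, hA, goodCol_set hC i hi, hG, hT⟩
  · exact ⟨lA, lC, _, lT, rfl, hA, hC, goodCol_set hG i hi, hT⟩
  · exact ⟨lA, lC, lG, _, rfl, hA, hC, hG, goodCol_set hT i hi⟩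

theorem goodDict_enum_fold {n : Nat} (m : List Char)
    (hm : ∀ ch ∈ m, ch = 'A' ∨ ch = 'C' ∨ ch = 'G' ∨ ch = 'T') :
    ∀ (s : Nat) (d : PySem.Dict Char (List Int)), GoodDict n d → s + m.length ≤ n →
      GoodDict n ((PySem.List.enumerate m (s : Int)).foldl
        (fun d iv => d.modify iv.2 []
          (fun l => PySem.List.pySetD l iv.1 (PySem.List.pyGetD l iv.1 0 + 1))) d) := by
  induction m with
  | nil => intro s d hd _; simpa [PySem.List.enumerate_nil] using hd
  | cons ch m ih =>
    intro s d hd hle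
    rw [PySem.List.enumerate_cons, List.foldl_cons]
    have h1 : GoodDict n (d.modify ch []
        (fun l => PySem.List.pySetD l (s : Int) (PySem.List.pyGetD l (s : Int) 0 + 1))) :=
      goodDict_modify hd ch (hm ch (by simp)) s (by simp at hle; omega)
    have h2 := ih (fun c hc => hm c (by simp [hc])) (s + 1) _ h1 (by simp at hle ⊢; omega)
    have : ((s : Int) + 1) = ((s + 1 : Nat) : Int) := by push_cast; ring
    rw [this]
    exact h2

theorem goodDict_motifs_fold {n : Nat} (l : List String)
    (hl : ∀ m ∈ l, m.toList.length ≤ n ∧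
      ∀ ch ∈ m.toList, ch = 'A' ∨ ch = 'C' ∨ ch = 'G' ∨ ch = 'T') :
    ∀ (d : PySem.Dict Char (List Int)), GoodDict n d →
      GoodDict n (l.foldl
        (fun d motif => (PySem.List.enumerate motif.toList 0).foldl
          (fun d iv => d.modify iv.2 []
            (fun l => PySem.List.pySetD l iv.1 (PySem.List.pyGetD l iv.1 0 + 1))) d) d) := by
  induction l with
  | nil => intro d hd; simpa using hd
  | cons m l ih =>
    intro d hd
    rw [List.foldl_cons]
    refine ih (fun x hx => hl x (by simp [hx])) _ ?_
    have h0 : (0 : Int) = ((0 : Nat) : Int) := rfl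
    rw [h0]
    exact goodDict_enum_fold m.toList (hl m (by simp)).2 0 d hd
      (by simpa using (hl m (by simp)).1)

theorem count_good (Motifs : List String) (hpre : Pre_ScorewithPseudoCounts Motifs) :
    GoodDict (Motifs.headD "").toList.length (CountWithPseudocounts Motifs) := by
  obtain ⟨hne, hall⟩ := hpre
  obtain ⟨m0, rest, rfl⟩ := List.exists_cons_of_ne_nil hne
  have hinit : ("ACGT".toList.foldl
      (fun d nt =>
        d.insert nt (PySem.List.pyRepeat [(1 : Int)]
          (PySem.Str.len ((PySem.List.pyGet? (m0 :: rest) 0).getD ""))))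
      PySem.Dict.empty : PySem.Dict Char (List Int))
    = PySem.Dict.mk [('A', List.replicate m0.toList.length 1),
        ('C', List.replicate m0.toList.length 1), ('G', List.replicate m0.toList.length 1),
        ('T', List.replicate m0.toList.length 1)] := by
    have : (PySem.List.pyGet? (m0 :: rest) 0).getD "" = m0 := by
      simp
    rw [show "ACGT".toList = ['A','C','G','T'] from rfl]
    simp only [List.foldl, this]
    have hrep : PySem.List.pyRepeat [(1 : Int)] (PySem.Str.len m0)
        = List.replicate m0.toList.length 1 := by
      rw [PySem.Str.len_eq, PySem.List.pyRepeat_singleton]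
      simp
    rw [hrep]
    rfl
  have hgood0 : GoodDict ((m0 :: rest).headD "").toList.length
      (PySem.Dict.mk [('A', List.replicate m0.toList.length 1),
        ('C', List.replicate m0.toList.length 1), ('G', List.replicate m0.toList.length 1),
        ('T', List.replicate m0.toList.length 1)]) := by
    refine ⟨_, _, _, _, rfl, ?_, ?_, ?_, ?_⟩ <;>
      exact ⟨by simp, fun x hx => by simp at hx; omega⟩
  simp only [CountWithPseudocounts]
  rw [hinit]
  have hall' : ∀ m ∈ (m0 :: rest),
      m.toList.length ≤ ((m0 :: rest).headD "").toList.length ∧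
      ∀ ch ∈ m.toList, ch = 'A' ∨ ch = 'C' ∨ ch = 'G' ∨ ch = 'T' := by
    simp only [List.all_eq_true, Bool.and_eq_true, decide_eq_true_eq, Bool.or_eq_true,
      beq_iff_eq] at hall
    intro m hm
    exact ⟨(hall m hm).1, fun ch hch => by
      rcases (hall m hm).2 ch hch with h | h | h | h <;> tauto⟩
  exact goodDict_motifs_fold (m0 :: rest) hall' _ hgood0

theorem one_le_col {l : List Int} {n : Nat} (hg : GoodCol n l) {j : Int}
    (h0 : 0 ≤ j) (hj : j < (n : Int)) : 1 ≤ PySem.List.pyGetD l j 0 := by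
  have hl : j < (l.length : Int) := by rw [hg.1]; exact hj
  rw [PySem.List.pyGetD_eq_getElem l 0 h0 hl]
  exact hg.2 _ (List.getElem_mem _)

theorem col4 (v w : Char → Int) (a c g t score : Int)
    (hvA : v 'A' = a) (hvC : v 'C' = c) (hvG : v 'G' = g) (hvT : v 'T' = t)
    (hwA : w 'A' = a) (hwC : w 'C' = c) (hwG : w 'G' = g) (hwT : w 'T' = t)
    (ha : 1 ≤ a) (hc : 1 ≤ c) (hg : 1 ≤ g) (ht : 1 ≤ t) :
    (['A','C','G','T'] : List Char).foldl
       (fun s k => if k ≠ (PySem.List.max? ['A','C','G','T'] w).getD 'A' ∧ v k ≠ 0 then s + v k else s) score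
    = score + (([a,c,g,t] : List Int).sum - (PySem.List.max? [a,c,g,t] (fun x => x)).getD 0) := by
  have ha' : a ≠ 0 := by omega
  have hc' : c ≠ 0 := by omega
  have hg' : g ≠ 0 := by omega
  have ht' : t ≠ 0 := by omega
  simp only [PySem.List.max?, List.foldl, List.sum_cons, List.sum_nil,
    hvA, hvC, hvG, hvT, hwA, hwC, hwG, hwT]
  split_ifs <;> (try dsimp only) <;> (try split_ifs) <;> (try dsimp only) <;>
    (try split_ifs) <;> (try dsimp only) <;>
    simp_all only [ne_eq, Option.getD_some, Char.reduceEq, not_false_eq_true, and_true,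
      not_true_eq_false, false_and, true_and, ite_true, ite_false] <;>
    omega

-- ===== VERDICT (by name: the statement is the Claim_ definition above) =====
theorem ScorewithPseudoCounts_spec : Claim_equal_ScorewithPseudoCounts := by
  intro Motifs _ hpre
  unfold Spec_ScorewithPseudoCounts
  obtain ⟨lA, lC, lG, lT, hd, hgA, hgC, hgG, hgT⟩ := count_good Motifs hpre
  have eA : (PySem.Dict.mk [('A',lA),('C',lC),('G',lG),('T',lT)]).getD 'A' ([] : List Int) = lA := rfl
  have eC : (PySem.Dict.mk [('A',lA),('C',lC),('G',lG),('T',lT)]).getD 'C' ([] : List Int) = lC := rfl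
  have eG : (PySem.Dict.mk [('A',lA),('C',lC),('G',lG),('T',lT)]).getD 'G' ([] : List Int) = lG := rfl
  have eT : (PySem.Dict.mk [('A',lA),('C',lC),('G',lG),('T',lT)]).getD 'T' ([] : List Int) = lT := rfl
  have ekeys : (PySem.Dict.mk [('A',lA),('C',lC),('G',lG),('T',lT)]).keys = ['A','C','G','T'] := rfl
  have hlit : ∀ x y z w : Int, ((((PySem.Dict.empty).insert 'A' x).insert 'C' y).insert 'G' z).insert 'T' w
      = PySem.Dict.mk [('A',x),('C',y),('G',z),('T',w)] := fun _ _ _ _ => rfl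
  have hkeys4 : ∀ x y z w : Int,
      (PySem.Dict.mk [('A',x),('C',y),('G',z),('T',w)] : PySem.Dict Char Int).keys
        = ['A','C','G','T'] := fun _ _ _ _ => rfl
  have hACGT : "ACGT".toList = ['A','C','G','T'] := rfl
  simp only [ScorewithPseudoCounts, ScorewithPseudoCounts_alt, ConsensuswithPseudoCounts,
    hd, hACGT, hlit, hkeys4, List.map_cons, List.map_nil, eA, eC, eG, eT, ekeys,
    PySem.List.len_eq, PySem.List.foldl_append_singleton_eq_map, List.nil_append,
    PySem.List.enumerate_eq_map_pyRange _ 'A', List.length_map,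
    PySem.List.length_pyRange_one, sub_zero, Int.toNat_natCast, List.foldl_map]
  refine PySem.List.foldl_congr_mem _ _ _ _ ?_
  intro score j hj
  obtain ⟨h0, hjn⟩ := PySem.List.mem_pyRange_one.1 hj
  try dsimp only
  rw [PySem.List.pyGetD_map_pyRange_of_nonneg _ _ _ _ h0 hjn]
  have hA1 : 1 ≤ PySem.List.pyGetD lA j 0 := one_le_col hgA h0 (by rw [hgA.1] at hjn; exact hjn)
  have hC1 : 1 ≤ PySem.List.pyGetD lC j 0 := one_le_col hgC h0 (by rw [hgA.1] at hjn; exact hjn)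
  have hG1 : 1 ≤ PySem.List.pyGetD lG j 0 := one_le_col hgG h0 (by rw [hgA.1] at hjn; exact hjn)
  have hT1 : 1 ≤ PySem.List.pyGetD lT j 0 := one_le_col hgT h0 (by rw [hgA.1] at hjn; exact hjn)
  exact col4
    (fun k => PySem.List.pyGetD ((PySem.Dict.mk [('A',lA),('C',lC),('G',lG),('T',lT)]).getD k []) j 0)
    (fun k => (PySem.Dict.mk [('A', PySem.List.pyGetD lA j 0), ('C', PySem.List.pyGetD lC j 0),
      ('G', PySem.List.pyGetD lG j 0), ('T', PySem.List.pyGetD lT j 0)] : PySem.Dict Char Int).getD k 0)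
    _ _ _ _ score rfl rfl rfl rfl rfl rfl rfl rfl hA1 hC1 hG1 hT1
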